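-- pv_equiv track=rewrite | github.com/barisbogdan/codecrafters-grep-python | app/main.py | calculate_length
-- ===== SOURCE A (Python) =====
-- def calculate_length(pattern, input_line):
--     min_char = 0
--     max_char = 0
--     while pattern:
--         if pattern[0] == "+":
--             max_char = len(input_line)
--             pattern = pattern[1:]
--         elif pattern[0] == "?":
--             min_char -= 1
--             pattern = pattern[1:]
--         elif pattern[0] == "\\":
--             if 1 < len(pattern):
--                 if pattern[1] == "d" or pattern[1] == "w":
--                     pattern = pattern[2:]
--                     min_char += 1
--                     if max_char <= len(input_line):
--                         max_char += 1
--                 else: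
--                     exit(1)
--         elif pattern[0] == "[":
--             end_idx = pattern.find("]")
--             pattern = pattern[end_idx + 2:]
--             min_char += 1
--             if max_char <= len(input_line):
--                 max_char += 1
--         else:
--             pattern = pattern[1:]
--             min_char += 1
--             if max_char <= len(input_line):
--                 max_char += 1
--     return [min_char, max_char]
-- ===== SOURCE B (Python) =====
-- def calculate_length(pattern, input_line):
--     n = len(input_line)
--     L = len(pattern)
--     min_char = 0
--     max_char = 0
--     i = 0
--     while i < L:
--         c = pattern[i]
--         if c == "+":
--             max_char = n
--             i += 1
--         elif c == "?":
--             min_char -= 1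
--             i += 1
--         elif c == "\\":
--             if i + 1 < L and (pattern[i + 1] == "d" or pattern[i + 1] == "w"):
--                 min_char += 1
--                 if max_char <= n:
--                     max_char += 1
--                 i += 2
--             else:
--                 exit(1)
--         elif c == "[":
--             j = pattern.find("]", i)
--             i = j + 2 if j != -1 else i + 1
--             min_char += 1
--             if max_char <= n:
--                 max_char += 1
--         else:
--             i += 1
--             min_char += 1
--             if max_char <= n:
--                 max_char += 1
--     return [min_char, max_char]
-- ===== Notes on version B (the rewrite author's own statement) =====
-- stated objective: faster
-- what changed: B scans the pattern once with an advancing index pointer (and find(']', i) from the current position) instead of A's loop that re-slices the remaining pattern string on every step.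
import Mathlib
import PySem

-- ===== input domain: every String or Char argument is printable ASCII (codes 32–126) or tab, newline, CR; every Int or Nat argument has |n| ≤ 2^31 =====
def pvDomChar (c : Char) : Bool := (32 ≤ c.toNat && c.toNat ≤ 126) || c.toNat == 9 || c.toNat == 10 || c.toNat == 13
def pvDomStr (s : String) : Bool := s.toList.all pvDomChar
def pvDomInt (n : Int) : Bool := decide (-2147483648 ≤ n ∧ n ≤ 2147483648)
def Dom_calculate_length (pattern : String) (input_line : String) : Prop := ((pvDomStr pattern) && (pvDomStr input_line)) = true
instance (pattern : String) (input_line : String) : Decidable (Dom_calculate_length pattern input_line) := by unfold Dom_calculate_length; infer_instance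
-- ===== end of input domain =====

-- B replaces A's repeated string slicing (quadratic re-allocation) with a single advancing
-- index pointer over the unchanged pattern string; objective: faster, same return value.

-- ===== PORT A =====
-- A's loop, transliterated: the current pattern SUFFIX is the recursion argument,
-- each step re-slices it ('pattern = pattern[k:]').  On a bad escape Python calls
-- exit(1) (SystemExit) and on a lone trailing backslash it loops forever; both are
-- outside Pre_ below, and the port returns the current [min_char, max_char] there.
def calcA (n : Int) : List Char → Int → Int → List Int
  | [], mn, mx => [mn, mx]
  | c :: rest, mn, mx =>
    if c = '+' then calcA n rest mn n
    else if c = '?' then calcA n rest (mn - 1) mx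
    else if c = '\\' then
      match rest with
      | [] => [mn, mx]          -- Python loops forever here (outside Pre_)
      | c2 :: r2 =>
        if c2 = 'd' ∨ c2 = 'w' then
          calcA n r2 (mn + 1) (if mx ≤ n then mx + 1 else mx)
        else [mn, mx]           -- Python exit(1) here (outside Pre_)
    else if c = '[' then
      -- end_idx = pattern.find("]"); pattern = pattern[end_idx+2:]
      match (c :: rest).idxOf? ']' with
      | some k => calcA n ((c :: rest).drop (k + 2)) (mn + 1) (if mx ≤ n then mx + 1 else mx)
      | none   => calcA n rest (mn + 1) (if mx ≤ n then mx + 1 else mx)   -- end_idx = -1, pattern[1:]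
    else calcA n rest (mn + 1) (if mx ≤ n then mx + 1 else mx)
  termination_by cs _ _ => cs.length
  decreasing_by all_goals first | (simp [List.length_drop]; omega) | simp | omega

def calculate_length (pattern : String) (input_line : String) : List Int :=
  calcA (input_line.toList.length : Int) pattern.toList 0 0

-- ===== PORT B =====
-- pattern.find("]", i) : index of the first ']' at position ≥ i, as in Python
def findFrom (cs : List Char) (i : Nat) : Option Nat :=
  (cs.drop i).idxOf? ']' |>.map (i + ·)

theorem findFrom_ge {cs : List Char} {i j : Nat} (h : findFrom cs i = some j) : i ≤ j := by
  unfold findFrom at h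
  rcases Option.map_eq_some_iff.mp h with ⟨k, _, hk⟩
  omega

-- B's loop: index pointer i over the fixed list, counters threaded through;
-- '.elim (i+1) (fun j => j+2)' is Source B's 'i = j + 2 if j != -1 else i + 1'
def calcB (cs : List Char) (n : Int) (i : Nat) (mn mx : Int) : List Int :=
  if h : i < cs.length then
    if cs[i] = '+' then calcB cs n (i + 1) mn n
    else if cs[i] = '?' then calcB cs n (i + 1) (mn - 1) mx
    else if cs[i] = '\\' then
      if h2 : i + 1 < cs.length then
        if cs[i + 1] = 'd' ∨ cs[i + 1] = 'w' then
          calcB cs n (i + 2) (mn + 1) (if mx ≤ n then mx + 1 else mx)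
        else [mn, mx]           -- exit(1) in Source B (outside Pre_)
      else [mn, mx]             -- exit(1) in Source B (outside Pre_)
    else if cs[i] = '[' then
      calcB cs n ((findFrom cs i).elim (i + 1) (fun j => j + 2)) (mn + 1) (if mx ≤ n then mx + 1 else mx)
    else calcB cs n (i + 1) (mn + 1) (if mx ≤ n then mx + 1 else mx)
  else [mn, mx]
  termination_by cs.length - i
  decreasing_by
    · omega
    · omega
    · omega
    · rcases hf : findFrom cs i with _ | j
      · simp [hf]; omega
      · have := findFrom_ge hf; simp [hf]; omega
    · omega

def calculate_length_alt (pattern : String) (input_line : String) : List Int :=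
  calcB pattern.toList (input_line.toList.length : Int) 0 0 0

-- ===== PRECONDITION & SPEC =====
-- validPat is the token GRAMMAR of the pattern language: a valid pattern is a sequence of
-- tokens '+', '?', '\d', '\w', a '[...]' group (which also consumes the following char),
-- or any other literal character; an escape reached by the scan whose next char is not
-- 'd'/'w' (or is missing) is invalid.
def validPatAux : Nat → List Char → Bool
  | _, [] => true
  | 0, _ :: _ => false   -- unreachable: the bound starts at the length and every token consumes ≥ 1 char
  | fuel + 1, c :: rest =>
    if c = '+' ∨ c = '?' then validPatAux fuel rest
    else if c = '\\' then
      match rest with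
      | [] => false
      | c2 :: r2 => if c2 = 'd' ∨ c2 = 'w' then validPatAux fuel r2 else false
    else if c = '[' then
      match (c :: rest).idxOf? ']' with
      | some k => validPatAux fuel ((c :: rest).drop (k + 2))
      | none   => validPatAux fuel rest
    else validPatAux fuel rest

def validPat (cs : List Char) : Bool := validPatAux cs.length cs

-- Pre_ excludes exactly the patterns on which A does not return a value: those whose scan
-- reaches a backslash not followed by 'd'/'w' — there Python A calls exit(1) (SystemExit),
-- or loops forever on a trailing lone backslash.  Every pattern on which A returns
-- (including bad backslashes hidden inside or right after a [...] group) satisfies Pre_.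
def Pre_calculate_length (pattern : String) (input_line : String) : Prop :=
  validPat pattern.toList = true
instance (pattern : String) (input_line : String) : Decidable (Pre_calculate_length pattern input_line) := by
  unfold Pre_calculate_length; infer_instance

def pvWitness_calculate_length : String × String := ("a\\d[bc]+x?", "hello")

def Spec_calculate_length (pattern : String) (input_line : String) (out : List Int) : Prop := out = calculate_length_alt pattern input_line
instance (pattern : String) (input_line : String) (out : List Int) : Decidable (Spec_calculate_length pattern input_line out) := by unfold Spec_calculate_length; infer_instance

-- ===== CLAIM (what is proved, stated in full; the proofs are below) =====
def Claim_equal_calculate_length : Prop := ∀ (pattern : String) (input_line : String), Dom_calculate_length pattern input_line → Pre_calculate_length pattern input_line → Spec_calculate_length pattern input_line (calculate_length pattern input_line)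

-- ===== LEMMAS AND PROOFS =====

theorem drop_eq_cons {cs : List Char} {i : Nat} (h : i < cs.length) :
    cs.drop i = cs[i] :: cs.drop (i + 1) := by
  rw [List.drop_eq_getElem_cons h]

theorem idxOf_drop (cs : List Char) (i : Nat) :
    (cs.drop i).idxOf? ']' = (findFrom cs i).map (· - i) := by
  unfold findFrom
  rcases h : (cs.drop i).idxOf? ']' with _ | k <;> simp [h]

theorem calcA_nil (n mn mx : Int) : calcA n [] mn mx = [mn, mx] := by
  rw [calcA.eq_def]

theorem calcA_cons (n mn mx : Int) (c : Char) (rest : List Char) :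
    calcA n (c :: rest) mn mx =
      (if c = '+' then calcA n rest mn n
       else if c = '?' then calcA n rest (mn - 1) mx
       else if c = '\\' then
         match rest with
         | [] => [mn, mx]
         | c2 :: r2 =>
           if c2 = 'd' ∨ c2 = 'w' then
             calcA n r2 (mn + 1) (if mx ≤ n then mx + 1 else mx)
           else [mn, mx]
       else if c = '[' then
         match (c :: rest).idxOf? ']' with
         | some k => calcA n ((c :: rest).drop (k + 2)) (mn + 1) (if mx ≤ n then mx + 1 else mx)
         | none   => calcA n rest (mn + 1) (if mx ≤ n then mx + 1 else mx)
       else calcA n rest (mn + 1) (if mx ≤ n then mx + 1 else mx)) := by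
  rw [calcA.eq_def]

theorem calcB_neg (cs : List Char) (n : Int) (i : Nat) (mn mx : Int) (h : ¬ i < cs.length) :
    calcB cs n i mn mx = [mn, mx] := by
  rw [calcB.eq_def]; simp [h]

theorem calcB_pos (cs : List Char) (n : Int) (i : Nat) (mn mx : Int) (h : i < cs.length) :
    calcB cs n i mn mx =
      (if cs[i] = '+' then calcB cs n (i + 1) mn n
       else if cs[i] = '?' then calcB cs n (i + 1) (mn - 1) mx
       else if cs[i] = '\\' then
         if i + 1 < cs.length then
           if cs[i + 1]! = 'd' ∨ cs[i + 1]! = 'w' then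
             calcB cs n (i + 2) (mn + 1) (if mx ≤ n then mx + 1 else mx)
           else [mn, mx]
         else [mn, mx]
       else if cs[i] = '[' then
         calcB cs n ((findFrom cs i).elim (i + 1) (fun j => j + 2)) (mn + 1) (if mx ≤ n then mx + 1 else mx)
       else calcB cs n (i + 1) (mn + 1) (if mx ≤ n then mx + 1 else mx)) := by
  rw [calcB.eq_def]
  simp only [dif_pos h]
  by_cases h2 : i + 1 < cs.length
  · simp [h2, getElem!_pos cs (i+1) h2]
  · simp [h2]

-- main invariant: running A on the suffix 'cs.drop i' equals running B at pointer i
theorem calcAB (cs : List Char) (n : Int) :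
    ∀ k i mn mx, cs.length - i ≤ k → calcA n (cs.drop i) mn mx = calcB cs n i mn mx := by
  intro k
  induction k with
  | zero =>
    intro i mn mx hk
    have h : ¬ i < cs.length := by omega
    have h0 : cs.drop i = [] := List.drop_eq_nil_of_le (by omega)
    rw [h0, calcA_nil, calcB_neg cs n i mn mx h]
  | succ k ih =>
    intro i mn mx hk
    by_cases h : i < cs.length
    · rw [drop_eq_cons h, calcA_cons, calcB_pos cs n i mn mx h]
      by_cases hp : cs[i] = '+'
      · simp only [hp, if_pos rfl]; exact ih (i + 1) mn n (by omega)
      · simp only [if_neg hp]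
        by_cases hq : cs[i] = '?'
        · simp only [hq]
          try simp only [if_neg (by simp : ¬('?' = '+')), if_pos rfl]
          exact ih (i + 1) (mn - 1) mx (by omega)
        · simp only [if_neg hq]
          by_cases hb : cs[i] = '\\'
          · simp only [hb]
            try simp only [if_neg (by simp : ¬('\\' = '+')), if_neg (by simp : ¬('\\' = '?')), if_pos rfl]
            by_cases h2 : i + 1 < cs.length
            · rw [drop_eq_cons h2]
              simp only [if_pos h2]
              by_cases hdw : cs[i + 1] = 'd' ∨ cs[i + 1] = 'w'
              · simp only [getElem!_pos cs (i+1) h2, hdw, if_true, if_pos trivial]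
                simpa using ih (i + 2) (mn + 1) (if mx ≤ n then mx + 1 else mx) (by omega)
              · simp [getElem!_pos cs (i+1) h2, hdw]
            · have hnil : cs.drop (i + 1) = [] := List.drop_eq_nil_of_le (by omega)
              rw [hnil]
              simp [h2]
          · simp only [if_neg hb]
            by_cases hl : cs[i] = '['
            · simp only [hl]
              try simp only [if_neg (by simp : ¬('[' = '+')), if_neg (by simp : ¬('[' = '?')),
                if_neg (by simp : ¬('[' = '\\')), if_pos rfl]
              have hdi : cs[i] :: cs.drop (i + 1) = cs.drop i := (drop_eq_cons h).symm
              rw [hl] at hdi; rw [hdi]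
              rw [idxOf_drop]
              rcases hf : findFrom cs i with _ | j
              · simp only [hf, Option.map_none, Option.elim]
                exact ih (i + 1) (mn + 1) (if mx ≤ n then mx + 1 else mx) (by omega)
              · have hij : i ≤ j := findFrom_ge hf
                simp only [hf, Option.map_some, Option.elim]
                have hdd : (cs.drop i).drop (j - i + 2) = cs.drop (j + 2) := by
                  rw [List.drop_drop]; congr 1; omega
                rw [hdd]
                exact ih (j + 2) (mn + 1) (if mx ≤ n then mx + 1 else mx) (by omega)
            · simp only [if_neg hl]
              exact ih (i + 1) (mn + 1) (if mx ≤ n then mx + 1 else mx) (by omega)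
    · have h0 : cs.drop i = [] := List.drop_eq_nil_of_le (by omega)
      rw [h0, calcA_nil, calcB_neg cs n i mn mx h]

-- ===== VERDICT (by name: the statement is the Claim_ definition above) =====
theorem calculate_length_spec : Claim_equal_calculate_length := by
  intro pattern input_line _ _
  unfold Spec_calculate_length calculate_length calculate_length_alt
  have := calcAB pattern.toList (input_line.toList.length : Int) pattern.toList.length 0 0 0 (by omega)
  simpa using this
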